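-- pv_equiv track=rewrite | github.com/Melvinmcrn/CompProg_python | 09_P12.py | all_eat
-- ===== SOURCE A (Python) =====
-- def eat(q1,q2):
--
--     if (q1[0]-q2[0])**2 == (q1[1]-q2[1])**2:
--         return True
--     elif q1[0]==q2[0]:
--         return True
--     elif q1[1]==q2[1]:
--         return True
--
--     return False
--
-- def all_eat(L):
--
--     out=[]
--     for i in range(len(L)-1):
--         for j in range(i+1,len(L)):
--
--             if eat(L[i],L[j]):
--                 out.append((i,j))
--
--     for i in range(len(out)):
--         for j in range(len(out)-1):
--
--             if out[j]>out[j+1]: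
--                 out[j], out[j+1] = out[j+1], out[j]
--
--     return out
-- ===== SOURCE B (Python) =====
-- def all_eat(L):
--     # Group queen indices by the four "lines" through each queen: row, column,
--     # diagonal and anti-diagonal (tagged so keys from different families never clash).
--     lines = {}
--     for i, (r, c) in enumerate(L):
--         for key in ((0, r), (1, c), (2, r - c), (3, r + c)):
--             lines.setdefault(key, []).append(i)
--     res = set()
--     for idxs in lines.values():
--         for a in range(len(idxs)):
--             for b in range(a + 1, len(idxs)):
--                 res.add((idxs[a], idxs[b]))
--     return sorted(res)
-- ===== Notes on version B (the rewrite author's own statement) =====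
-- stated objective: faster
-- what changed: Instead of testing every index pair and then running a quadratic (no-op) bubble sort over the output, B buckets queen indices once by their four line keys (row, column, diagonal, anti-diagonal), emits index pairs only within buckets into a set, and returns sorted(set).
import Mathlib
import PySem

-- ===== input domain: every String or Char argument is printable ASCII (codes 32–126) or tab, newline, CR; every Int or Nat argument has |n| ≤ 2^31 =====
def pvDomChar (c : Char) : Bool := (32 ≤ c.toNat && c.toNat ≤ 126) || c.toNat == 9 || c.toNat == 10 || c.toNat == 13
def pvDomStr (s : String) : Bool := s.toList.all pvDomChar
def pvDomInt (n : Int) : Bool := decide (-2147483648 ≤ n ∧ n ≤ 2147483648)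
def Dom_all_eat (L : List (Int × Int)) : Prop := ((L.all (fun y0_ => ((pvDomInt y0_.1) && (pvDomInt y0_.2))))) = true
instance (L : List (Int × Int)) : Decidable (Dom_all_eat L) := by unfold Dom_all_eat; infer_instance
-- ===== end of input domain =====

-- B buckets queen indices by their four line keys and sorts the emitted pair set,
-- replacing A's all-pairs scan followed by a quadratic no-op bubble sort (B measured faster).


-- ===== PORT A =====
def eat (q1 q2 : Int × Int) : Bool :=
  if (q1.1 - q2.1) ^ 2 = (q1.2 - q2.2) ^ 2 then true
  else if q1.1 = q2.1 then true
  else if q1.2 = q2.2 then true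
  else false

-- Python tuple comparison out[j] > out[j+1]
def tupGt (u v : Int × Int) : Bool := u.1 > v.1 || (u.1 = v.1 && u.2 > v.2)

-- the first nested loop of A: collect the attacking index pairs
def collectPairs (L : List (Int × Int)) : List (Int × Int) :=
  (PySem.List.pyRange 0 ((L.length : Int) - 1)).foldl (fun out i =>
    (PySem.List.pyRange (i + 1) (L.length : Int)).foldl (fun out j =>
      if eat (PySem.List.pyGetD L i (0, 0)) (PySem.List.pyGetD L j (0, 0)) then
        out ++ [(i, j)]
      else out) out) []

-- the second nested loop of A: a bubble sort over `out`
-- (indices j in range(len(o)-1) are nonnegative, so .toNat is exact here)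
def bubbleInner (o : List (Int × Int)) : List (Int × Int) :=
  (PySem.List.pyRange 0 ((o.length : Int) - 1)).foldl (fun o j =>
    let a := PySem.List.pyGetD o j (0, 0)
    let b := PySem.List.pyGetD o (j + 1) (0, 0)
    if tupGt a b then (o.set j.toNat b).set (j + 1).toNat a else o) o

def bubbleSort (out : List (Int × Int)) : List (Int × Int) :=
  (PySem.List.pyRange 0 (out.length : Int)).foldl (fun o _ => bubbleInner o) out

def all_eat (L : List (Int × Int)) : List (Int × Int) :=
  bubbleSort (collectPairs L)

-- ===== PORT B =====
-- `lines = {}; for i,(r,c) in enumerate(L): for key in (...): lines.setdefault(key, []).append(i)`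
def linesOf (L : List (Int × Int)) : PySem.Dict (Int × Int) (List Int) :=
  (PySem.List.enumerate L).foldl (fun d q =>
    [((0, q.2.1), q.1), ((1, q.2.2), q.1), ((2, q.2.1 - q.2.2), q.1), ((3, q.2.1 + q.2.2), q.1)].foldl
      (fun d e => d.modify e.1 [] (· ++ [e.2])) d) PySem.Dict.empty

-- `res = set(); for idxs in vals: for a in ...: for b in ...: res.add((idxs[a], idxs[b]))`
def resOf (vals : List (List Int)) : PySem.Set (Int × Int) :=
  vals.foldl (fun res idxs =>
    (PySem.List.pyRange 0 (idxs.length : Int)).foldl (fun res a =>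
      (PySem.List.pyRange (a + 1) (idxs.length : Int)).foldl (fun res b =>
        PySem.Set.add res (PySem.List.pyGetD idxs a 0, PySem.List.pyGetD idxs b 0)) res) res)
    PySem.Set.empty

def all_eat_alt (L : List (Int × Int)) : List (Int × Int) :=
  PySem.List.sorted2 (resOf (linesOf L).values) (fun z => z.1) (fun z => z.2)

-- ===== PRECONDITION & SPEC =====
def Spec_all_eat (L : List (Int × Int)) (out : List (Int × Int)) : Prop := out = all_eat_alt L
instance (L : List (Int × Int)) (out : List (Int × Int)) : Decidable (Spec_all_eat L out) := by unfold Spec_all_eat; infer_instance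

-- ===== CLAIM (what is proved, stated in full; the proofs are below) =====
def Claim_equal_all_eat : Prop := ∀ (L : List (Int × Int)), Dom_all_eat L → Spec_all_eat L (all_eat L)

-- ===== LEMMAS AND PROOFS =====

-- strict and non-strict lexicographic order on pairs (Python's tuple < / <=)
def lexLt (u v : Int × Int) : Prop := u.1 < v.1 ∨ (u.1 = v.1 ∧ u.2 < v.2)
def lexLe (u v : Int × Int) : Prop := ¬ lexLt v u

-- the four tagged line keys of a queen
def keys4 (p : Int × Int) : List (Int × Int) := [(0, p.1), (1, p.2), (2, p.1 - p.2), (3, p.1 + p.2)]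

-- the bucket of queen indices on line `k`
def bkt (L : List (Int × Int)) (k : Int × Int) : List Int :=
  (PySem.List.enumerate L).flatMap (fun q => if k ∈ keys4 q.2 then [q.1] else [])

-- the pairs emitted from one bucket
def pairsOf (b : List Int) : List (Int × Int) :=
  (PySem.List.pyRange 0 (b.length : Int)).flatMap (fun a =>
    (PySem.List.pyRange (a + 1) (b.length : Int)).map (fun c =>
      (PySem.List.pyGetD b a 0, PySem.List.pyGetD b c 0)))

-- the key occurrences, and the flat entry list behind `linesOf`
def keyOccs (L : List (Int × Int)) : List (Int × Int) :=
  (PySem.List.enumerate L).flatMap (fun q => keys4 q.2)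
def entriesOf (L : List (Int × Int)) : List ((Int × Int) × Int) :=
  (PySem.List.enumerate L).flatMap (fun q => (keys4 q.2).map (fun k => (k, q.1)))

-- the canonical result list: A's first loop, written as a flatMap
def cList (L : List (Int × Int)) : List (Int × Int) :=
  (PySem.List.pyRange 0 ((L.length : Int) - 1)).flatMap (fun i =>
    ((PySem.List.pyRange (i + 1) (L.length : Int)).filter (fun j =>
      eat (PySem.List.pyGetD L i (0, 0)) (PySem.List.pyGetD L j (0, 0)))).map (fun j => (i, j)))

def good (L : List (Int × Int)) (z : Int × Int) : Prop :=
  0 ≤ z.1 ∧ z.1 < z.2 ∧ z.2 < (L.length : Int) ∧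
    eat (PySem.List.pyGetD L z.1 (0, 0)) (PySem.List.pyGetD L z.2 (0, 0)) = true

-- ---------- generic: a fold whose every step fixes `a` returns `a` ----------
theorem foldl_fix {α β : Type} {f : α → β → α} {a : α} {l : List β}
    (h : ∀ x ∈ l, f a x = a) : l.foldl f a = a := by
  induction l with
  | nil => rfl
  | cons x t ih =>
    have hx : f a x = a := h x (by simp)
    simp only [List.foldl_cons, hx]
    exact ih (fun y hy => h y (by simp [hy]))

-- ---------- A side ----------
theorem collectPairs_eq (L : List (Int × Int)) : collectPairs L = cList L := by
  unfold collectPairs cList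
  simp only [PySem.List.foldl_append_if, PySem.List.foldl_append_eq_flatMap, List.nil_append]

theorem mem_cList (L : List (Int × Int)) (z : Int × Int) : z ∈ cList L ↔ good L z := by
  obtain ⟨x, y⟩ := z
  simp only [cList, good, List.mem_flatMap, List.mem_map, List.mem_filter,
    PySem.List.mem_pyRange_one]
  constructor
  · rintro ⟨i, ⟨hi0, hi1⟩, j, ⟨⟨hj0, hj1⟩, hef⟩, heq⟩
    cases heq
    exact ⟨hi0, by omega, hj1, hef⟩
  · rintro ⟨hx0, hxy, hyn, hef⟩
    exact ⟨x, ⟨hx0, by omega⟩, y, ⟨⟨by omega, hyn⟩, hef⟩, rfl⟩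

theorem cList_pairwise (L : List (Int × Int)) : (cList L).Pairwise lexLt := by
  unfold cList
  rw [List.pairwise_flatMap]
  constructor
  · intro i _
    rw [List.pairwise_map]
    exact ((PySem.List.pairwise_lt_pyRange_one _ _).filter _).imp (fun h => Or.inr ⟨rfl, h⟩)
  · refine (PySem.List.pairwise_lt_pyRange_one 0 _).imp ?_
    intro a b hab x hx y hy
    simp only [List.mem_map] at hx hy
    obtain ⟨j, _, rfl⟩ := hx
    obtain ⟨j', _, rfl⟩ := hy
    exact Or.inl hab

theorem cList_nodup (L : List (Int × Int)) : (cList L).Nodup := by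
  refine (cList_pairwise L).imp ?_
  intro a b hab
  rintro rfl
  rcases hab with h | ⟨_, h⟩ <;> omega

theorem bubbleInner_fix (o : List (Int × Int)) (h : o.Pairwise lexLt) : bubbleInner o = o := by
  unfold bubbleInner
  apply foldl_fix
  intro j hj
  rw [PySem.List.mem_pyRange_one] at hj
  have hj1 : j.toNat < o.length := by omega
  have hj2 : j.toNat + 1 < o.length := by omega
  have ha : PySem.List.pyGetD o j (0, 0) = o[j.toNat] :=
    PySem.List.pyGetD_eq_getElem o _ hj.1 (by omega)
  have hb : PySem.List.pyGetD o (j + 1) (0, 0) = o[(j + 1).toNat] :=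
    PySem.List.pyGetD_eq_getElem o _ (by omega) (by omega)
  have hidx : (j + 1).toNat = j.toNat + 1 := by omega
  have hlt : lexLt o[j.toNat] o[j.toNat + 1] :=
    List.pairwise_iff_getElem.mp h j.toNat (j.toNat + 1) hj1 hj2 (by omega)
  have hgt : tupGt o[j.toNat] o[j.toNat + 1] = false := by
    unfold lexLt at hlt
    simp only [tupGt, Bool.or_eq_false_iff, Bool.and_eq_false_iff, decide_eq_false_iff_not,
      not_lt]
    omega
  simp only [ha, hb]
  rw [show o[(j+1).toNat] = o[j.toNat + 1] from by simp [hidx]]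
  simp [hgt]

theorem all_eat_eq (L : List (Int × Int)) : all_eat L = cList L := by
  unfold all_eat bubbleSort
  rw [collectPairs_eq]
  apply foldl_fix
  intro _ _
  exact bubbleInner_fix _ (cList_pairwise L)

-- ---------- B side: the dict ----------
theorem linesOf_eq (L : List (Int × Int)) :
    linesOf L = (entriesOf L).foldl (fun d e => d.modify e.1 [] (· ++ [e.2])) PySem.Dict.empty := by
  unfold linesOf entriesOf
  rw [List.foldl_flatMap]
  simp only [keys4, List.map_cons, List.map_nil, List.foldl_cons, List.foldl_nil]

theorem keys4_filter_map (p : Int × Int) (i : Int) (k : Int × Int) :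
    (((keys4 p).map (fun k' => (k', i))).filter (fun e => e.1 == k)).map (fun e => e.2)
      = if k ∈ keys4 p then [i] else [] := by
  by_cases c0 : (0, p.1) = k
  · subst c0; norm_num [keys4, List.filter_cons]
  · by_cases c1 : ((1 : Int), p.2) = k
    · subst c1; norm_num [keys4, List.filter_cons]
    · by_cases c2 : ((2 : Int), p.1 - p.2) = k
      · subst c2; norm_num [keys4, List.filter_cons]
      · by_cases c3 : ((3 : Int), p.1 + p.2) = k
        · subst c3; norm_num [keys4, List.filter_cons]
        · have d0 : k ≠ (0, p.1) := fun h => c0 h.symm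
          have d1 : k ≠ (1, p.2) := fun h => c1 h.symm
          have d2 : k ≠ (2, p.1 - p.2) := fun h => c2 h.symm
          have d3 : k ≠ (3, p.1 + p.2) := fun h => c3 h.symm
          simp [keys4, c0, c1, c2, c3, d0, d1, d2, d3]

theorem linesOf_getD (L : List (Int × Int)) (k : Int × Int) :
    (linesOf L).getD k [] = bkt L k := by
  rw [linesOf_eq, PySem.Dict.getD_foldl_modify_append, PySem.Dict.getD_empty, List.nil_append]
  unfold entriesOf bkt
  rw [List.filter_flatMap, List.map_flatMap]
  congr 1
  funext q
  exact keys4_filter_map q.2 q.1 k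

theorem linesOf_keys (L : List (Int × Int)) :
    (linesOf L).keys = PySem.Set.ofList (keyOccs L) := by
  rw [linesOf_eq]
  rw [PySem.Dict.keys_foldl_modify_key (entriesOf L) (fun e => e.1) [] (fun _ e v => v ++ [e.2])]
  rw [PySem.Dict.keys_empty, PySem.Set.ofList_eq_foldl]
  unfold PySem.Set.update
  have h : (entriesOf L).map (fun e => e.1) = keyOccs L := by
    unfold entriesOf keyOccs
    rw [List.map_flatMap]
    rfl
  rw [h]

theorem linesOf_nodup (L : List (Int × Int)) : (linesOf L).keys.Nodup := by
  rw [linesOf_eq]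
  exact PySem.Dict.nodup_keys_foldl_modify_key (entriesOf L) (fun e => e.1) [] (fun _ e v => v ++ [e.2])
    PySem.Dict.empty PySem.Dict.nodup_keys_empty

theorem linesOf_values (L : List (Int × Int)) :
    (linesOf L).values = (PySem.Set.ofList (keyOccs L)).map (fun k => bkt L k) := by
  rw [PySem.Dict.values_eq_map_keys (linesOf L) (linesOf_nodup L) [], linesOf_keys]
  exact List.map_congr_left (fun k _ => linesOf_getD L k)

-- ---------- B side: the emitted pair set ----------
theorem resOf_eq (vals : List (List Int)) :
    resOf vals = PySem.Set.ofList (vals.flatMap pairsOf) := by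
  unfold resOf pairsOf
  rw [PySem.Set.ofList_eq_foldl]
  simp only [List.foldl_flatMap, List.foldl_map]
  rfl

theorem mem_bkt (L : List (Int × Int)) (k : Int × Int) (x : Int) :
    x ∈ bkt L k ↔ ∃ m : ℕ, ∃ _ : m < L.length, x = (m : Int) ∧ k ∈ keys4 L[m] := by
  unfold bkt
  simp only [List.mem_flatMap, PySem.List.mem_enumerate_iff]
  constructor
  · rintro ⟨q, ⟨m, hm, rfl⟩, hx⟩
    dsimp only at hx
    split at hx
    · simp only [List.mem_singleton] at hx
      exact ⟨m, hm, by omega, by assumption⟩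
    · simp at hx
  · rintro ⟨m, hm, rfl, hk⟩
    exact ⟨(0 + (m : Int), L[m]), ⟨m, hm, rfl⟩, by simp [hk]⟩

theorem bkt_pairwise (L : List (Int × Int)) (k : Int × Int) : (bkt L k).Pairwise (· < ·) := by
  unfold bkt
  rw [List.pairwise_flatMap]
  constructor
  · intro q _
    split
    · exact List.pairwise_singleton _ _
    · exact List.Pairwise.nil
  · refine (PySem.List.pairwise_lt_enumerate L 0).imp ?_
    intro q1 q2 h x hx y hy
    split at hx
    · simp only [List.mem_singleton] at hx
      split at hy
      · simp only [List.mem_singleton] at hy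
        subst hx; subst hy; exact h
      · simp at hy
    · simp at hx

theorem mem_pairsOf (b : List Int) (hb : b.Pairwise (· < ·)) (z : Int × Int) :
    z ∈ pairsOf b ↔ z.1 ∈ b ∧ z.2 ∈ b ∧ z.1 < z.2 := by
  obtain ⟨x, y⟩ := z
  unfold pairsOf
  simp only [List.mem_flatMap, List.mem_map, PySem.List.mem_pyRange_one]
  constructor
  · rintro ⟨a, ⟨ha0, ha1⟩, c, ⟨hc0, hc1⟩, heq⟩
    have hga : PySem.List.pyGetD b a 0 = b[a.toNat] :=
      PySem.List.pyGetD_eq_getElem b _ ha0 (by omega)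
    have hgc : PySem.List.pyGetD b c 0 = b[c.toNat] :=
      PySem.List.pyGetD_eq_getElem b _ (by omega) (by omega)
    rw [hga, hgc] at heq
    cases heq
    refine ⟨List.getElem_mem _, List.getElem_mem _, ?_⟩
    exact List.pairwise_iff_getElem.mp hb a.toNat c.toNat (by omega) (by omega) (by omega)
  · rintro ⟨h1, h2, hlt⟩
    obtain ⟨ia, hia, ha⟩ := List.mem_iff_getElem.mp h1
    obtain ⟨ic, hic, hc⟩ := List.mem_iff_getElem.mp h2
    have hord : ia < ic := by
      rcases Nat.lt_trichotomy ia ic with h | h | h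
      · exact h
      · subst h; rw [ha] at hc; omega
      · have := List.pairwise_iff_getElem.mp hb ic ia hic hia h
        omega
    refine ⟨(ia : Int), ⟨by omega, by omega⟩, (ic : Int), ⟨by omega, by omega⟩, ?_⟩
    have hga : PySem.List.pyGetD b (ia : Int) 0 = b[ia] := by
      rw [PySem.List.pyGetD_eq_getElem b _ (by omega) (by omega)]
      congr 1
    have hgc : PySem.List.pyGetD b (ic : Int) 0 = b[ic] := by
      rw [PySem.List.pyGetD_eq_getElem b _ (by omega) (by omega)]
      congr 1
    rw [hga, hgc, ha, hc]

theorem mem_keyOccs (L : List (Int × Int)) (k : Int × Int) :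
    k ∈ keyOccs L ↔ ∃ m : ℕ, ∃ _ : m < L.length, k ∈ keys4 L[m] := by
  unfold keyOccs
  simp only [List.mem_flatMap, PySem.List.mem_enumerate_iff]
  constructor
  · rintro ⟨q, ⟨m, hm, rfl⟩, hk⟩
    exact ⟨m, hm, hk⟩
  · rintro ⟨m, hm, hk⟩
    exact ⟨(0 + (m : Int), L[m]), ⟨m, hm, rfl⟩, hk⟩

-- membership in the flattened bucket pairs is exactly: two distinct indices sharing a line
theorem mem_values_pairs (L : List (Int × Int)) (z : Int × Int) :
    z ∈ ((linesOf L).values.flatMap pairsOf) ↔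
      (0 ≤ z.1 ∧ z.1 < z.2 ∧ z.2 < (L.length : Int) ∧
        ∃ k, k ∈ keys4 (PySem.List.pyGetD L z.1 (0, 0)) ∧ k ∈ keys4 (PySem.List.pyGetD L z.2 (0, 0))) := by
  rw [linesOf_values, List.flatMap_map]
  simp only [List.mem_flatMap, PySem.Set.mem_ofList]
  constructor
  · rintro ⟨k, hk, hz⟩
    rw [mem_pairsOf _ (bkt_pairwise L k)] at hz
    obtain ⟨h1, h2, hlt⟩ := hz
    obtain ⟨m1, hm1, he1, hk1⟩ := (mem_bkt L k _).mp h1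
    obtain ⟨m2, hm2, he2, hk2⟩ := (mem_bkt L k _).mp h2
    have hg1 : PySem.List.pyGetD L z.1 (0, 0) = L[m1] := by
      rw [he1, PySem.List.pyGetD_eq_getElem L _ (by omega) (by omega)]
      congr 1
    have hg2 : PySem.List.pyGetD L z.2 (0, 0) = L[m2] := by
      rw [he2, PySem.List.pyGetD_eq_getElem L _ (by omega) (by omega)]
      congr 1
    exact ⟨by omega, hlt, by omega, k, by rw [hg1]; exact hk1, by rw [hg2]; exact hk2⟩
  · rintro ⟨h0, hlt, hn, k, hk1, hk2⟩
    have hg1 : PySem.List.pyGetD L z.1 (0, 0) = L[z.1.toNat] :=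
      PySem.List.pyGetD_eq_getElem L _ h0 (by omega)
    have hg2 : PySem.List.pyGetD L z.2 (0, 0) = L[z.2.toNat] :=
      PySem.List.pyGetD_eq_getElem L _ (by omega) (by omega)
    rw [hg1] at hk1
    rw [hg2] at hk2
    refine ⟨k, (mem_keyOccs L k).mpr ⟨z.1.toNat, by omega, hk1⟩, ?_⟩
    rw [mem_pairsOf _ (bkt_pairwise L k)]
    exact ⟨(mem_bkt L k _).mpr ⟨z.1.toNat, by omega, by omega, hk1⟩,
           (mem_bkt L k _).mpr ⟨z.2.toNat, by omega, by omega, hk2⟩, hlt⟩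

-- shared line key ↔ A's eat test
theorem sq_eq_iff (a b : Int) : a ^ 2 = b ^ 2 ↔ (a = b ∨ a = -b) := by
  constructor
  · intro h
    have h2 : (a - b) * (a + b) = 0 := by linear_combination h
    rcases mul_eq_zero.mp h2 with h3 | h3
    · left; omega
    · right; omega
  · rintro (rfl | rfl) <;> ring

theorem eat_iff (p q : Int × Int) :
    eat p q = true ↔ ((p.1 - q.1) ^ 2 = (p.2 - q.2) ^ 2 ∨ p.1 = q.1 ∨ p.2 = q.2) := by
  unfold eat
  split_ifs <;> simp_all

theorem shared_iff (p q : Int × Int) :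
    (∃ k, k ∈ keys4 p ∧ k ∈ keys4 q) ↔ eat p q = true := by
  rw [eat_iff]
  constructor
  · rintro ⟨k, hp, hq⟩
    simp only [keys4, List.mem_cons, List.not_mem_nil, or_false] at hp hq
    rcases hp with rfl | rfl | rfl | rfl <;> rcases hq with h | h | h | h <;>
      (rw [Prod.ext_iff] at h; obtain ⟨h1, h2⟩ := h; dsimp only at h1 h2) <;>
      first
        | exact Or.inr (Or.inl h2)
        | exact Or.inr (Or.inr h2)
        | (refine Or.inl ?_; rw [show p.1 - q.1 = p.2 - q.2 from by omega])
        | (refine Or.inl ?_; rw [show p.1 - q.1 = -(p.2 - q.2) from by omega]; ring)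
  · intro h
    rcases h with h | h | h
    · rcases (sq_eq_iff _ _).mp h with h2 | h2
      · exact ⟨(2, p.1 - p.2), by simp [keys4], by simp [keys4]; omega⟩
      · exact ⟨(3, p.1 + p.2), by simp [keys4], by simp [keys4]; omega⟩
    · exact ⟨(0, p.1), by simp [keys4], by simp [keys4, h]⟩
    · exact ⟨(1, p.2), by simp [keys4], by simp [keys4, h]⟩

-- ---------- sorted2 with lexicographic keys ----------
def ltB (u v : Int × Int) : Bool := decide (u.1 < v.1) || (!decide (v.1 < u.1) && decide (u.2 < v.2))

theorem ltB_true_iff (u v : Int × Int) : ltB u v = true ↔ lexLt u v := by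
  simp only [ltB, lexLt, Bool.or_eq_true, Bool.and_eq_true, Bool.not_eq_true',
    decide_eq_true_eq, decide_eq_false_iff_not]
  omega

theorem sorted2_unfold (xs : List (Int × Int)) :
    PySem.List.sorted2 xs (fun z => z.1) (fun z => z.2)
      = xs.foldl (fun acc x => PySem.List.insertBy ltB x acc) [] := rfl

theorem insertBy_pairwise (x : Int × Int) (acc : List (Int × Int)) (h : acc.Pairwise lexLe) :
    (PySem.List.insertBy ltB x acc).Pairwise lexLe := by
  induction acc with
  | nil => simp [PySem.List.insertBy]
  | cons y ys ih =>
    rw [show PySem.List.insertBy ltB x (y :: ys)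
        = if ltB x y then x :: y :: ys else y :: PySem.List.insertBy ltB x ys from rfl]
    by_cases hxy : ltB x y = true
    · rw [if_pos hxy]
      refine List.Pairwise.cons ?_ h
      intro z hz
      have hxyl := (ltB_true_iff x y).mp hxy
      rcases List.mem_cons.mp hz with rfl | hz'
      · unfold lexLe lexLt at *; omega
      · have hyz : lexLe y z := (List.pairwise_cons.mp h).1 z hz'
        unfold lexLe lexLt at *; omega
    · rw [if_neg (by simpa using hxy)]
      obtain ⟨h1, h2⟩ := List.pairwise_cons.mp h
      refine List.Pairwise.cons ?_ (ih h2)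
      intro z hz
      rcases (PySem.List.mem_insertBy ltB x z ys).mp hz with rfl | hz'
      · intro hc
        exact hxy ((ltB_true_iff z y).mpr hc)
      · exact h1 z hz'

theorem sorted2_pairwise_lex (xs : List (Int × Int)) :
    (PySem.List.sorted2 xs (fun z => z.1) (fun z => z.2)).Pairwise lexLe := by
  rw [sorted2_unfold]
  suffices aux : ∀ (l : List (Int × Int)) (acc : List (Int × Int)), acc.Pairwise lexLe →
      (l.foldl (fun acc x => PySem.List.insertBy ltB x acc) acc).Pairwise lexLe by
    exact aux xs [] (by simp)
  intro l
  induction l with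
  | nil => intro acc h; exact h
  | cons x t ih => intro acc h; exact ih _ (insertBy_pairwise x acc h)

theorem sorted2_eq_of_pairwise (xs ys : List (Int × Int)) (hp : ys.Perm xs)
    (hs : ys.Pairwise lexLt) :
    PySem.List.sorted2 xs (fun z => z.1) (fun z => z.2) = ys := by
  apply List.Perm.eq_of_pairwise (le := lexLe)
  · intro a b _ _ hab hba
    unfold lexLe lexLt at hab hba
    obtain ⟨a1, a2⟩ := a; obtain ⟨b1, b2⟩ := b
    simp only [Prod.mk.injEq]
    constructor <;> omega
  · exact sorted2_pairwise_lex xs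
  · exact hs.imp (fun {a b} hab => by unfold lexLe lexLt at *; omega)
  · exact (PySem.List.sorted2_perm xs _ _ false).trans hp.symm

-- ---------- assembly ----------
theorem alt_eq (L : List (Int × Int)) : all_eat_alt L = cList L := by
  unfold all_eat_alt
  rw [resOf_eq]
  apply sorted2_eq_of_pairwise
  · rw [List.perm_ext_iff_of_nodup (cList_nodup L) (PySem.Set.nodup_ofList _)]
    intro z
    rw [PySem.Set.mem_ofList, mem_cList, mem_values_pairs]
    unfold good
    rw [← shared_iff]
  · exact cList_pairwise L

-- ===== VERDICT (by name: the statement is the Claim_ definition above) =====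
theorem all_eat_spec : Claim_equal_all_eat := by
  intro L _
  unfold Spec_all_eat
  rw [all_eat_eq, alt_eq]
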